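-- pv_equiv track=rewrite | github.com/rscai/python99 | python99/misc/p703.py | doConjecture
-- ===== SOURCE A (Python) =====
-- def doConjecture(nodes, edges, markedNodes, remainNos):
--     if len(nodes) == 0:
--         return [[]]
--     v = nodes[0]
--     remainNodes = nodes[1:]
--     return [[(v,no)]+remain
--             for no in remainNos
--             for remain in doConjecture(remainNodes, edges, markedNodes + [(v, no)], [remainNo for remainNo in remainNos if remainNo != no])
--             if isValid(markedNodes+[(v, no)], edges)]
--
-- def isValid(markedNodes, edges):
--     maxEdgeNo = len(edges)
--     minEdgeNo = 1
--     usedEdgeNos = set()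
--     nodeNoDict = {}
--     for markedNode in markedNodes:
--         nodeNoDict[markedNode[0]] = markedNode[1]
--     for edge in edges:
--         start = edge[0]
--         end = edge[1]
--         if start in nodeNoDict and end in nodeNoDict:
--             diff = abs(nodeNoDict[start]-nodeNoDict[end])
--             if diff < minEdgeNo or diff > maxEdgeNo:
--                 return False
--             elif diff in usedEdgeNos:
--                 return False
--             else:
--                 usedEdgeNos.add(diff)
--     return True
-- ===== SOURCE B (Python) =====
-- def doConjecture(nodes, edges, markedNodes, remainNos):
--     # Prunes invalid partial labelings BEFORE recursing (A recurses first and filters after).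
--     results = []
--
--     def backtrack(rest, marked, remaining, path):
--         if not rest:
--             results.append(path)
--             return
--         v = rest[0]
--         for no in remaining:
--             cand = marked + [(v, no)]
--             if _valid(cand, edges):
--                 backtrack(rest[1:], cand,
--                           [r for r in remaining if r != no],
--                           path + [(v, no)])
--
--     backtrack(nodes, markedNodes, remainNos, [])
--     return results
--
--
-- def _valid(marked, edges):
--     pos = dict(marked)
--     diffs = [abs(pos[a] - pos[b]) for a, b in edges if a in pos and b in pos]
--     return all(1 <= d <= len(edges) for d in diffs) and len(set(diffs)) == len(diffs)
-- ===== Notes on version B (the rewrite author's own statement) =====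
-- stated objective: faster
-- what changed: A recurses over all remaining labels first and filters the recursion's results by re-validating the whole marking afterwards; B is an accumulator-passing backtracker that validates the candidate marking BEFORE recursing, pruning invalid branches, with a one-pass validity test (dict + diff list) instead of A's early-return loop over a mutable set.
import Mathlib
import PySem

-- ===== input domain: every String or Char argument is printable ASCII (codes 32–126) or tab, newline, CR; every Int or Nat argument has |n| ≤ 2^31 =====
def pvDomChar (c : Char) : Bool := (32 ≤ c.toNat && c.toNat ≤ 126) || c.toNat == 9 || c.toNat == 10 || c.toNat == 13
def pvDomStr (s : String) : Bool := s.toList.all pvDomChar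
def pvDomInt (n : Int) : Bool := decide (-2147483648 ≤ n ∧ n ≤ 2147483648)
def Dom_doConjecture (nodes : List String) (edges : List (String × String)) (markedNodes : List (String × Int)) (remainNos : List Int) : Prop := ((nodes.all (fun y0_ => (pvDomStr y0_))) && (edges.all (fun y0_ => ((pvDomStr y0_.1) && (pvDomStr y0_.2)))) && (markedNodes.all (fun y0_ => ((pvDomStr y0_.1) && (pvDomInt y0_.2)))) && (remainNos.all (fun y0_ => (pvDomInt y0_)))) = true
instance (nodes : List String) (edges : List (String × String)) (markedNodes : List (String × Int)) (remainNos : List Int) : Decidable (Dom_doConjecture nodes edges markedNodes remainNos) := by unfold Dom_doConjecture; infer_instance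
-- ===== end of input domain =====

-- B replaces A's recurse-then-filter comprehension by a pruning backtracker that
-- checks validity BEFORE recursing (and a one-pass validity test); return value identical.

-- ===== PORT A =====
-- the 'for edge in edges' loop of isValid, with its early returns
def pvIsValidLoop (maxEdgeNo : Int) (nodeNoDict : PySem.Dict String Int)
    (edges : List (String × String)) (usedEdgeNos : PySem.Set Int) : Bool :=
  match edges with
  | [] => true
  | edge :: rest =>
    if nodeNoDict.contains edge.1 && nodeNoDict.contains edge.2 then
      let diff := |nodeNoDict.getD edge.1 0 - nodeNoDict.getD edge.2 0|
      if diff < 1 || diff > maxEdgeNo then false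
      else if PySem.Set.contains usedEdgeNos diff then false
      else pvIsValidLoop maxEdgeNo nodeNoDict rest (PySem.Set.add usedEdgeNos diff)
    else pvIsValidLoop maxEdgeNo nodeNoDict rest usedEdgeNos

def isValid (markedNodes : List (String × Int)) (edges : List (String × String)) : Bool :=
  let nodeNoDict := markedNodes.foldl (fun d mn => d.insert mn.1 mn.2)
    (PySem.Dict.empty : PySem.Dict String Int)
  pvIsValidLoop (edges.length : Int) nodeNoDict edges PySem.Set.empty

def doConjecture (nodes : List String) (edges : List (String × String)) (markedNodes : List (String × Int)) (remainNos : List Int) : List (List (String × Int)) :=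
  match nodes with
  | [] => [[]]
  | v :: remainNodes =>
    remainNos.flatMap (fun no =>
      (doConjecture remainNodes edges (markedNodes ++ [(v, no)])
          (remainNos.filter (fun remainNo => remainNo != no))).flatMap
        (fun remain =>
          if isValid (markedNodes ++ [(v, no)]) edges then [[(v, no)] ++ remain] else []))

-- ===== PORT B =====
def pvValidB (marked : List (String × Int)) (edges : List (String × String)) : Bool :=
  let pos := PySem.Dict.ofList marked
  let diffs := edges.filterMap (fun e =>
    if pos.contains e.1 && pos.contains e.2
    then some |pos.getD e.1 0 - pos.getD e.2 0| else none)
  (diffs.all (fun d => 1 ≤ d && d ≤ (edges.length : Int))) &&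
    (PySem.Set.len (PySem.Set.ofList diffs) == (diffs.length : Int))

def pvBacktrack (edges : List (String × String)) :
    List String → List (String × Int) → List Int → List (String × Int) →
    List (List (String × Int))
  | [], _, _, path => [path]
  | v :: rs, marked, remaining, path =>
    remaining.flatMap (fun no =>
      if pvValidB (marked ++ [(v, no)]) edges then
        pvBacktrack edges rs (marked ++ [(v, no)])
          (remaining.filter (fun r => r != no)) (path ++ [(v, no)])
      else [])

def doConjecture_alt (nodes : List String) (edges : List (String × String)) (markedNodes : List (String × Int)) (remainNos : List Int) : List (List (String × Int)) :=
  pvBacktrack edges nodes markedNodes remainNos []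

-- ===== PRECONDITION & SPEC =====
def Spec_doConjecture (nodes : List String) (edges : List (String × String)) (markedNodes : List (String × Int)) (remainNos : List Int) (out : List (List (String × Int))) : Prop := out = doConjecture_alt nodes edges markedNodes remainNos
instance (nodes : List String) (edges : List (String × String)) (markedNodes : List (String × Int)) (remainNos : List Int) (out : List (List (String × Int))) : Decidable (Spec_doConjecture nodes edges markedNodes remainNos out) := by unfold Spec_doConjecture; infer_instance

-- ===== CLAIM (what is proved, stated in full; the proofs are below) =====
def Claim_equal_doConjecture : Prop := ∀ (nodes : List String) (edges : List (String × String)) (markedNodes : List (String × Int)) (remainNos : List Int), Dom_doConjecture nodes edges markedNodes remainNos → Spec_doConjecture nodes edges markedNodes remainNos (doConjecture nodes edges markedNodes remainNos)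

-- ===== LEMMAS AND PROOFS =====

-- the edge differences visible under a marking (the list B's comprehension builds)
def pvDiffs (pos : PySem.Dict String Int) (edges : List (String × String)) : List Int :=
  edges.filterMap (fun e =>
    if pos.contains e.1 && pos.contains e.2
    then some |pos.getD e.1 0 - pos.getD e.2 0| else none)

-- a set built by PySem.Set.ofList has the source's length iff the source had no duplicates
lemma pvLenOfList_eq_iff (xs : List Int) :
    (PySem.Set.ofList xs).length = xs.length ↔ xs.Nodup := by
  induction xs with
  | nil => simp [PySem.Set.ofList_nil]
  | cons x xs ih =>
    rw [PySem.Set.ofList_cons]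
    by_cases hx : x ∈ xs
    · have hmem : x ∈ PySem.Set.ofList xs := (PySem.Set.mem_ofList _ _).2 hx
      have hlt : ((PySem.Set.ofList xs).discard x).length < (PySem.Set.ofList xs).length := by
        apply List.length_filter_lt_length_iff_exists.2
        exact ⟨x, hmem, by simp⟩
      have hle := PySem.Set.length_ofList_le xs
      constructor
      · intro h; simp only [List.length_cons] at h; omega
      · intro h; exact absurd hx (by simp [List.nodup_cons] at h; exact h.1)
    · have hdis : (PySem.Set.ofList xs).discard x = PySem.Set.ofList xs := by
        apply List.filter_eq_self.2
        intro y hy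
        have : y ∈ xs := (PySem.Set.mem_ofList _ _).1 hy
        have : y ≠ x := fun h => hx (h ▸ this)
        simp [this]
      rw [hdis]
      simp only [List.length_cons, List.nodup_cons]
      constructor
      · intro h; exact ⟨hx, ih.1 (by omega)⟩
      · intro h; rw [ih.2 h.2]

-- characterisation of A's isValid loop: true iff every remaining diff is in range and
-- the used set extended by the remaining diffs stays duplicate-free
lemma pvIsValidLoop_iff (M : Int) (d : PySem.Dict String Int) :
    ∀ (edges : List (String × String)) (used : PySem.Set Int), used.Nodup →
      (pvIsValidLoop M d edges used = true ↔
        (∀ x ∈ pvDiffs d edges, 1 ≤ x ∧ x ≤ M) ∧ (used ++ pvDiffs d edges).Nodup) := by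
  intro edges
  induction edges with
  | nil => intro used hu; simp [pvIsValidLoop, pvDiffs, hu]
  | cons e rest ih =>
    intro used hu
    by_cases hc : (d.contains e.1 && d.contains e.2) = true
    · have hc2 := hc
      rw [Bool.and_eq_true] at hc2
      obtain ⟨h1, h2⟩ := hc2
      set x := |d.getD e.1 0 - d.getD e.2 0| with hxdef
      have hdiffs : pvDiffs d (e :: rest) = x :: pvDiffs d rest := by
        simp [pvDiffs, h1, h2, ← hxdef]
      rw [hdiffs]
      by_cases hr : (x < 1 || x > M) = true
      · have hA : pvIsValidLoop M d (e :: rest) used = false := by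
          simp only [pvIsValidLoop, hc, if_true]
          simp [← hxdef, hr]
        rw [hA]
        simp only [Bool.false_eq_true, false_iff]
        rintro ⟨hall, -⟩
        have := hall x (List.mem_cons_self ..)
        simp only [Bool.or_eq_true, decide_eq_true_eq] at hr
        omega
      · have hrange : 1 ≤ x ∧ x ≤ M := by
          simp only [Bool.or_eq_true, decide_eq_true_eq, not_or] at hr
          omega
        by_cases hused : PySem.Set.contains used x = true
        · have hxu : x ∈ used := (PySem.Set.contains_iff _ _).1 hused
          have hA : pvIsValidLoop M d (e :: rest) used = false := by
            simp only [pvIsValidLoop, hc, if_true]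
            simp [← hxdef, hr, hxu]
          rw [hA]
          simp only [Bool.false_eq_true, false_iff]
          rintro ⟨-, hnd⟩
          exact (List.disjoint_of_nodup_append hnd) hxu (List.mem_cons_self ..)
        · have hxnu : x ∉ used := fun h => hused ((PySem.Set.contains_iff _ _).2 h)
          have hstep : pvIsValidLoop M d (e :: rest) used
              = pvIsValidLoop M d rest (PySem.Set.add used x) := by
            simp only [pvIsValidLoop, hc, if_true]
            simp [← hxdef, hr, hxnu]
          have hadd : PySem.Set.add used x = used ++ [x] := PySem.Set.add_of_not_mem hxnu
          have hnu' : (PySem.Set.add used x).Nodup := by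
            rw [hadd]
            exact List.Nodup.append hu (List.nodup_singleton x)
              (fun a ha hb => hxnu ((List.mem_singleton.mp hb) ▸ ha))
          rw [hstep, ih _ hnu', hadd, List.append_assoc]
          simp only [List.singleton_append]
          constructor
          · rintro ⟨hall, hnd⟩
            refine ⟨?_, hnd⟩
            intro y hy
            rcases List.mem_cons.1 hy with h | h
            · subst h; exact hrange
            · exact hall y h
          · rintro ⟨hall, hnd⟩
            exact ⟨fun y hy => hall y (List.mem_cons_of_mem _ hy), hnd⟩
    · obtain hc' : (d.contains e.1 && d.contains e.2) = false := by
        simpa using hc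
      have hdiffs : pvDiffs d (e :: rest) = pvDiffs d rest := by
        rcases Bool.and_eq_false_iff.mp hc' with h | h <;>
          simp [pvDiffs, h]
      have hstep : pvIsValidLoop M d (e :: rest) used = pvIsValidLoop M d rest used := by
        simp only [pvIsValidLoop, hc']
        simp
      rw [hstep, hdiffs, ih _ hu]

-- A's isValid and B's one-pass validity test agree
lemma pvValid_eq (marked : List (String × Int)) (edges : List (String × String)) :
    isValid marked edges = pvValidB marked edges := by
  have h1 : isValid marked edges
      = pvIsValidLoop (edges.length : Int) (PySem.Dict.ofList marked) edges PySem.Set.empty := rfl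
  have h2 : pvValidB marked edges
      = ((pvDiffs (PySem.Dict.ofList marked) edges).all
            (fun y => 1 ≤ y && y ≤ (edges.length : Int)) &&
          (PySem.Set.len (PySem.Set.ofList (pvDiffs (PySem.Dict.ofList marked) edges))
            == ((pvDiffs (PySem.Dict.ofList marked) edges).length : Int))) := rfl
  rw [h1, h2, Bool.eq_iff_iff,
    pvIsValidLoop_iff (edges.length : Int) (PySem.Dict.ofList marked) edges
      PySem.Set.empty List.nodup_nil]
  have hempty : (PySem.Set.empty : PySem.Set Int) ++ pvDiffs (PySem.Dict.ofList marked) edges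
      = pvDiffs (PySem.Dict.ofList marked) edges := List.nil_append _
  rw [hempty]
  simp only [Bool.and_eq_true, List.all_eq_true, beq_iff_eq, PySem.Set.len,
    Nat.cast_inj, decide_eq_true_eq]
  constructor
  · rintro ⟨hall, hnd⟩
    refine ⟨fun y hy => ?_, (pvLenOfList_eq_iff _).2 hnd⟩
    have := hall y hy
    omega
  · rintro ⟨hall, hlen⟩
    refine ⟨fun y hy => ?_, (pvLenOfList_eq_iff _).1 hlen⟩
    have := hall y hy
    omega

-- B's backtracker computes A's recursion, each result prefixed by the path accumulator
lemma pvBacktrack_eq (edges : List (String × String)) :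
    ∀ (rest : List String) (marked : List (String × Int)) (remaining : List Int)
      (path : List (String × Int)),
      pvBacktrack edges rest marked remaining path
        = (doConjecture rest edges marked remaining).map (fun r => path ++ r) := by
  intro rest
  induction rest with
  | nil => intro marked remaining path; simp [pvBacktrack, doConjecture]
  | cons v rs ih =>
    intro marked remaining path
    show remaining.flatMap _ = _
    rw [doConjecture, List.map_flatMap]
    refine congrArg (fun f => List.flatMap f remaining) (funext fun no => ?_)
    rw [← pvValid_eq]
    by_cases hv : isValid (marked ++ [(v, no)]) edges = true
    · simp only [hv, if_true]
      rw [ih]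
      generalize doConjecture rs edges (marked ++ [(v, no)])
        (List.filter (fun r => r != no) remaining) = l
      induction l with
      | nil => rfl
      | cons a t iht => simpa using iht
    · simp only [Bool.not_eq_true] at hv
      simp [hv]

-- ===== VERDICT (by name: the statement is the Claim_ definition above) =====
theorem doConjecture_spec : Claim_equal_doConjecture := by
  intro nodes edges markedNodes remainNos _
  unfold Spec_doConjecture doConjecture_alt
  rw [pvBacktrack_eq]
  simp
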